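-- pv_equiv track=rewrite | github.com/mebeim/aoc | 2023/solutions/day11.py | sum_distances
-- ===== SOURCE A (Python) =====
-- def sum_distances(counts, multiplier):
-- 	total = partial_sum = previous = space = 0
--
-- 	for n in counts:
-- 		if n:
-- 			total       += (n * (2 * previous + n - 1) // 2) * space
-- 			total       -= n * partial_sum + ((n - 1) * n // 2) * space
-- 			partial_sum += n * space
-- 			previous    += n
-- 			space       += 1
-- 		else:
-- 			space += multiplier
--
-- 	return total
-- ===== SOURCE B (Python) =====
-- def sum_distances(counts, multiplier):
-- 	# Different decomposition: first materialize the expanded coordinate of each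
-- 	# occupied cell, then sum weighted pairwise gaps with an explicit double loop.
-- 	occupied = []
-- 	coord = 0
-- 	for n in counts:
-- 		if n:
-- 			occupied.append((coord, n))
-- 			coord += 1
-- 		else:
-- 			coord += multiplier
--
-- 	total = 0
-- 	for i in range(len(occupied)):
-- 		ci, ni = occupied[i]
-- 		for j in range(i + 1, len(occupied)):
-- 			cj, nj = occupied[j]
-- 			total += ni * nj * (cj - ci)
-- 	return total
-- ===== Notes on version B (the rewrite author's own statement) =====
-- stated objective: alternative
-- what changed: Replaces the single-pass incremental prefix-sum accumulator (with its //2 triangular-number terms) by an explicit two-phase algorithm: build the list of (expanded coordinate, count) for occupied cells, then sum n_i*n_j*(c_j-c_i) over all pairs with a nested loop.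
import Mathlib
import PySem

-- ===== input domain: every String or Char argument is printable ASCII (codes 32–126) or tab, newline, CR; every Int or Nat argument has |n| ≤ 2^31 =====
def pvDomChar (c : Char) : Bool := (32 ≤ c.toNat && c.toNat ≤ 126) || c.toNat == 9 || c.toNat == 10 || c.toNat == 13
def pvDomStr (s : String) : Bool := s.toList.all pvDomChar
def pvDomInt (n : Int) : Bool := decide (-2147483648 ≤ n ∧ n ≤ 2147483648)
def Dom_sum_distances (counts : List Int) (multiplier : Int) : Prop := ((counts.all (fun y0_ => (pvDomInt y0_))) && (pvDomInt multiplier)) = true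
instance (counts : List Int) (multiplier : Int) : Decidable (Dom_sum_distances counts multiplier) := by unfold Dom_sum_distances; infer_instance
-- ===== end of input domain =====

-- B replaces A's single-pass prefix-sum accumulator by an explicit (coordinate, count)
-- list plus a nested all-pairs sum: an alternative decomposition, not faster.

-- ===== PORT A =====
-- loop body of A, one step of the for-loop over counts
def pvStepA (multiplier : Int) (st : Int × Int × Int × Int) (n : Int) : Int × Int × Int × Int :=
  let total := st.1; let partial_sum := st.2.1; let previous := st.2.2.1; let space := st.2.2.2
  if n ≠ 0 then
    (total + (PySem.Int.floordiv (n * (2 * previous + n - 1)) 2) * space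
           - (n * partial_sum + (PySem.Int.floordiv ((n - 1) * n) 2) * space),
     partial_sum + n * space, previous + n, space + 1)
  else
    (total, partial_sum, previous, space + multiplier)

def sum_distances (counts : List Int) (multiplier : Int) : Int :=
  (counts.foldl (pvStepA multiplier) (0, 0, 0, 0)).1

-- ===== PORT B =====
-- one step of Source B's first loop: append occupied cell / advance the coordinate
def pvStepB (multiplier : Int) (st : List (Int × Int) × Int) (n : Int) : List (Int × Int) × Int :=
  if n ≠ 0 then (st.1 ++ [(st.2, n)], st.2 + 1) else (st.1, st.2 + multiplier)

-- first pass of Source B: build the (expanded coordinate, count) list of occupied cells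
def pvOccupied (counts : List Int) (multiplier : Int) : List (Int × Int) :=
  (counts.foldl (pvStepB multiplier) ([], 0)).1
-- inner loop of Source B: contribution of cell (c, n) against the cells after it
def pvInner (c n : Int) (rest : List (Int × Int)) : Int :=
  rest.foldl (fun acc p => acc + n * p.2 * (p.1 - c)) 0

-- outer loop of Source B
def pvPairSum : List (Int × Int) → Int
  | [] => 0
  | (c, n) :: rest => pvInner c n rest + pvPairSum rest

def sum_distances_alt (counts : List Int) (multiplier : Int) : Int :=
  pvPairSum (pvOccupied counts multiplier)

-- ===== PRECONDITION & SPEC =====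
def Spec_sum_distances (counts : List Int) (multiplier : Int) (out : Int) : Prop := out = sum_distances_alt counts multiplier
instance (counts : List Int) (multiplier : Int) (out : Int) : Decidable (Spec_sum_distances counts multiplier out) := by unfold Spec_sum_distances; infer_instance

-- ===== CLAIM (what is proved, stated in full; the proofs are below) =====
def Claim_equal_sum_distances : Prop := ∀ (counts : List Int) (multiplier : Int), Dom_sum_distances counts multiplier → Spec_sum_distances counts multiplier (sum_distances counts multiplier)

-- ===== LEMMAS AND PROOFS =====

-- proof-side pure description of B's first pass
def pvBd (multiplier : Int) : List Int → Int → List (Int × Int)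
  | [], _ => []
  | n :: rest, s => if n ≠ 0 then (s, n) :: pvBd multiplier rest (s + 1) else pvBd multiplier rest (s + multiplier)

def pvNsum : List (Int × Int) → Int
  | [] => 0
  | p :: rest => p.2 + pvNsum rest

def pvWsum : List (Int × Int) → Int
  | [] => 0
  | p :: rest => p.2 * p.1 + pvWsum rest

theorem pvOccupied_fold (multiplier : Int) (counts : List Int) :
    ∀ (acc : List (Int × Int)) (s : Int),
      (counts.foldl (pvStepB multiplier) (acc, s)).1 = acc ++ pvBd multiplier counts s := by
  induction counts with
  | nil => intro acc s; simp [pvBd]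
  | cons n rest ih =>
    intro acc s
    by_cases hn : n = 0
    · simp [pvStepB, pvBd, hn, ih]
    · simp [pvStepB, pvBd, hn, ih]

theorem pvInner_eq (c n : Int) (rest : List (Int × Int)) :
    ∀ (a : Int),
      rest.foldl (fun acc p => acc + n * p.2 * (p.1 - c)) a
        = a + n * pvWsum rest - n * c * pvNsum rest := by
  induction rest with
  | nil => intro a; simp [pvWsum, pvNsum]
  | cons p r ih => intro a; simp only [List.foldl_cons, ih, pvWsum, pvNsum]; ring

theorem pvEvenHalf (n : Int) : ∃ k : Int, (n - 1) * n = 2 * k ∧ PySem.Int.floordiv ((n - 1) * n) 2 = k := by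
  rcases Int.even_mul_succ_self (n - 1) with ⟨k, hk⟩
  have h2 : (n - 1) * n = 2 * k := by linear_combination hk
  refine ⟨k, h2, ?_⟩
  rw [PySem.Int.floordiv_eq_ediv_of_pos (by norm_num)]
  rw [h2, Int.mul_ediv_cancel_left _ (by norm_num)]

theorem pvStepTotal (n p ps s t : Int) :
    t + (PySem.Int.floordiv (n * (2 * p + n - 1)) 2) * s
      - (n * ps + (PySem.Int.floordiv ((n - 1) * n) 2) * s)
    = t + n * p * s - n * ps := by
  rcases pvEvenHalf n with ⟨k, hk, hfd⟩
  have h1 : n * (2 * p + n - 1) = 2 * (n * p + k) := by nlinarith [hk]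
  have : PySem.Int.floordiv (n * (2 * p + n - 1)) 2 = n * p + k := by
    rw [h1, PySem.Int.floordiv_eq_ediv_of_pos (by norm_num),
        Int.mul_ediv_cancel_left _ (by norm_num)]
  rw [this, hfd]; ring

theorem pvMain (multiplier : Int) (counts : List Int) :
    ∀ (t ps p s : Int),
      (counts.foldl (pvStepA multiplier) (t, ps, p, s)).1
      = t + p * pvWsum (pvBd multiplier counts s) - ps * pvNsum (pvBd multiplier counts s)
          + pvPairSum (pvBd multiplier counts s) := by
  induction counts with
  | nil => intro t ps p s; simp [pvBd, pvWsum, pvNsum, pvPairSum]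
  | cons n rest ih =>
    intro t ps p s
    rw [List.foldl_cons]
    by_cases hn : n = 0
    · rw [show pvStepA multiplier (t, ps, p, s) n = (t, ps, p, s + multiplier) from by
        simp [pvStepA, hn]]
      rw [show pvBd multiplier (n :: rest) s = pvBd multiplier rest (s + multiplier) from by
        simp [pvBd, hn]]
      exact ih t ps p (s + multiplier)
    · rw [show pvStepA multiplier (t, ps, p, s) n
            = (t + (PySem.Int.floordiv (n * (2 * p + n - 1)) 2) * s
                 - (n * ps + (PySem.Int.floordiv ((n - 1) * n) 2) * s),
               ps + n * s, p + n, s + 1) from by simp [pvStepA, hn]]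
      rw [ih, pvStepTotal n p ps s t]
      simp only [pvBd, hn, ne_eq, not_false_eq_true, if_pos,
        pvWsum, pvNsum, pvPairSum, pvInner, pvInner_eq]
      ring

-- ===== VERDICT (by name: the statement is the Claim_ definition above) =====
theorem sum_distances_spec : Claim_equal_sum_distances := by
  intro counts multiplier _
  unfold Spec_sum_distances sum_distances sum_distances_alt
  rw [pvMain, pvOccupied, pvOccupied_fold]
  simp
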